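-- pv_equiv track=rewrite | github.com/KaltsitsPie/final-project | efficient_3.py | helper_div_conquer
-- ===== SOURCE A (Python) =====
-- def helper_div_conquer(X, Y,delta,alpha_table):
--     prev = []
--     for i in range(len(Y) + 1):
--         prev.append(i*delta)
--
--     for x in X:
--         current = [prev[0] + delta]
--         for j in range(1, len(Y) + 1):
--             current.append(min(
--                 current[j - 1] + delta,  # Insertion
--                 prev[j] + delta,  # Deletion
--                 prev[j - 1] + alpha_table[(x, Y[j - 1])]  # Match/Mismatch
--             ))
--         prev = current
--     return prev
-- ===== SOURCE B (Python) =====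
-- def helper_div_conquer(X, Y, delta, alpha_table):
--     # Transposed DP: iterate columns (over Y) with a rolling column of length len(X)+1,
--     # collecting the last entry of each column -- the same last DP row as A, by a
--     # different traversal order.
--     m = len(X)
--     prev_col = [i * delta for i in range(m + 1)]
--     result = [m * delta]
--     for y in Y:
--         cur = [prev_col[0] + delta]
--         for i in range(1, m + 1):
--             cur.append(min(
--                 cur[i - 1] + delta,
--                 prev_col[i] + delta,
--                 prev_col[i - 1] + alpha_table[(X[i - 1], y)]
--             ))
--         prev_col = cur
--         result.append(cur[m])
--     return result
-- ===== Notes on version B (the rewrite author's own statement) =====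
-- stated objective: alternative
-- what changed: B transposes the DP: it iterates over Y as the outer loop keeping a rolling COLUMN of length len(X)+1 (A iterates over X keeping a rolling row of length len(Y)+1), and collects the last entry of each column to form the last row.
import Mathlib
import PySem

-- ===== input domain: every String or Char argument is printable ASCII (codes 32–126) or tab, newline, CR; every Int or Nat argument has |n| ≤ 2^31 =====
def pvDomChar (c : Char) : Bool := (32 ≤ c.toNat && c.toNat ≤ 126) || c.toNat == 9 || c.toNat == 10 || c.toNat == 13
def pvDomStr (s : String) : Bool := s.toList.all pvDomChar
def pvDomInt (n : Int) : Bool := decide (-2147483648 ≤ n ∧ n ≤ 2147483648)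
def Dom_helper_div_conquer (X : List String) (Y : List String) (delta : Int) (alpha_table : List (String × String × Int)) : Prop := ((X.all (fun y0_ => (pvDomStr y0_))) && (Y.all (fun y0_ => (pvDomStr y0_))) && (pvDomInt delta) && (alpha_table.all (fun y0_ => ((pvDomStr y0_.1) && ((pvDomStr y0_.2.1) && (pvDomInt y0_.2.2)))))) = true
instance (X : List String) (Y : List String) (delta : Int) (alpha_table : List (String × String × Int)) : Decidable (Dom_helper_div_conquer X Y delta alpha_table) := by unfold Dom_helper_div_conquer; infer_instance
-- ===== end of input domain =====

-- B transposes the DP (columns over Y with a rolling column of length len(X)+1, collecting each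
-- column's last entry) instead of A's rows over X with a rolling row of length len(Y)+1; same cost,
-- alternative traversal.

-- ===== PORT A =====
-- dict lookup alpha_table[(x, y)]: first match (assoc-list convention); KeyError cases are outside Pre_
def alphaGet (t : List (String × String × Int)) (x y : String) : Int :=
  match t.find? (fun p => p.1 == x && p.2.1 == y) with
  | some p => p.2.2
  | none => 0

def helper_div_conquer (X : List String) (Y : List String) (delta : Int) (alpha_table : List (String × String × Int)) : List Int :=
  -- prev = []; for i in range(len(Y)+1): prev.append(i*delta)
  let prev := (PySem.List.pyRange 0 ((Y.length : Int) + 1) 1).foldl (fun acc i => acc ++ [i * delta]) []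
  -- for x in X: build current row; list indices are always in range here, so pyGetD's default is never used
  X.foldl (fun prev x =>
    (PySem.List.pyRange 1 ((Y.length : Int) + 1) 1).foldl (fun current j =>
      current ++ [min (min (PySem.List.pyGetD current (j - 1) 0 + delta)
                           (PySem.List.pyGetD prev j 0 + delta))
                      (PySem.List.pyGetD prev (j - 1) 0 + alphaGet alpha_table x (PySem.List.pyGetD Y (j - 1) ""))])
      [PySem.List.pyGetD prev 0 0 + delta]) prev

-- ===== PORT B =====
def helper_div_conquer_alt (X : List String) (Y : List String) (delta : Int) (alpha_table : List (String × String × Int)) : List Int :=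
  let m : Int := X.length
  -- prev_col = [i*delta for i in range(m+1)]; result = [m*delta]
  let prev_col := (PySem.List.pyRange 0 (m + 1) 1).map (fun i => i * delta)
  let st := Y.foldl (fun (st : List Int × List Int) y =>
      let cur := (PySem.List.pyRange 1 (m + 1) 1).foldl (fun cur i =>
          cur ++ [min (min (PySem.List.pyGetD cur (i - 1) 0 + delta)
                           (PySem.List.pyGetD st.1 i 0 + delta))
                      (PySem.List.pyGetD st.1 (i - 1) 0 + alphaGet alpha_table (PySem.List.pyGetD X (i - 1) "") y)])
        [PySem.List.pyGetD st.1 0 0 + delta]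
      (cur, st.2 ++ [PySem.List.pyGetD cur m 0]))
    (prev_col, [m * delta])
  st.2

-- ===== PRECONDITION & SPEC =====
-- Pre_ excludes exactly the inputs where Python A raises KeyError: some needed pair (x, y) missing from alpha_table
def Pre_helper_div_conquer (X : List String) (Y : List String) (delta : Int) (alpha_table : List (String × String × Int)) : Prop :=
  ∀ x ∈ X, ∀ y ∈ Y, (alpha_table.find? (fun p => p.1 == x && p.2.1 == y)).isSome = true
instance (X : List String) (Y : List String) (delta : Int) (alpha_table : List (String × String × Int)) : Decidable (Pre_helper_div_conquer X Y delta alpha_table) := by unfold Pre_helper_div_conquer; infer_instance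

def pvWitness_helper_div_conquer : List String × List String × Int × (List (String × String × Int)) :=
  (["a"], ["b"], 1, [("a", "b", 2)])

def Spec_helper_div_conquer (X : List String) (Y : List String) (delta : Int) (alpha_table : List (String × String × Int)) (out : List Int) : Prop := out = helper_div_conquer_alt X Y delta alpha_table
instance (X : List String) (Y : List String) (delta : Int) (alpha_table : List (String × String × Int)) (out : List Int) : Decidable (Spec_helper_div_conquer X Y delta alpha_table out) := by unfold Spec_helper_div_conquer; infer_instance

-- ===== CLAIM (what is proved, stated in full; the proofs are below) =====
def Claim_equal_helper_div_conquer : Prop := ∀ (X : List String) (Y : List String) (delta : Int) (alpha_table : List (String × String × Int)), Dom_helper_div_conquer X Y delta alpha_table → Pre_helper_div_conquer X Y delta alpha_table → Spec_helper_div_conquer X Y delta alpha_table (helper_div_conquer X Y delta alpha_table)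

-- ===== LEMMAS AND PROOFS =====

-- The full alignment DP table, defined once; both ports are proved to compute its last row.
def dpD (X Y : List String) (delta : Int) (t : List (String × String × Int)) : Nat → Nat → Int
  | 0, j => (j : Int) * delta
  | i+1, 0 => ((i : Int) + 1) * delta
  | i+1, j+1 => min (min (dpD X Y delta t (i+1) j + delta) (dpD X Y delta t i (j+1) + delta))
                    (dpD X Y delta t i j + alphaGet t (X.getD i "") (Y.getD j ""))
termination_by i j => (i, j)

lemma dpD_zero_right (X Y : List String) (delta : Int) (t : List (String × String × Int)) (i : Nat) :
    dpD X Y delta t i 0 = (i : Int) * delta := by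
  cases i <;> simp [dpD]

def rowD (X Y : List String) (delta : Int) (t : List (String × String × Int)) (i : Nat) : List Int :=
  (List.range (Y.length + 1)).map (fun j => dpD X Y delta t i j)

def colD (X Y : List String) (delta : Int) (t : List (String × String × Int)) (j : Nat) : List Int :=
  (List.range (X.length + 1)).map (fun i => dpD X Y delta t i j)

def resD (X Y : List String) (delta : Int) (t : List (String × String × Int)) (k : Nat) : List Int :=
  (List.range (k + 1)).map (fun j => dpD X Y delta t X.length j)


lemma dpD_succ_zero (X Y : List String) (delta : Int) (t : List (String × String × Int)) (i : Nat) :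
    dpD X Y delta t (i+1) 0 = dpD X Y delta t i 0 + delta := by
  rw [dpD_zero_right, dpD_zero_right]; push_cast; ring

lemma rowD_getD (X Y : List String) (delta : Int) (t : List (String × String × Int)) (i j : Nat)
    (h : j < Y.length + 1) : (rowD X Y delta t i).getD j 0 = dpD X Y delta t i j := by
  unfold rowD; exact PySem.List.getD_map_range _ _ _ _ h

lemma colD_getD (X Y : List String) (delta : Int) (t : List (String × String × Int)) (j i : Nat)
    (h : i < X.length + 1) : (colD X Y delta t j).getD i 0 = dpD X Y delta t i j := by
  unfold colD; exact PySem.List.getD_map_range _ _ _ _ h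

lemma innerA (X Y : List String) (delta : Int) (t : List (String × String × Int)) (i : Nat) (x : String)
    (hx : x = X.getD i "") (k : Nat) (hk : k ≤ Y.length) :
    (PySem.List.pyRange 1 ((k : Int) + 1) 1).foldl
      (fun current j => current ++ [min (min (PySem.List.pyGetD current (j - 1) 0 + delta)
              (PySem.List.pyGetD (rowD X Y delta t i) j 0 + delta))
          (PySem.List.pyGetD (rowD X Y delta t i) (j - 1) 0
            + alphaGet t x (PySem.List.pyGetD Y (j - 1) ""))])
      [PySem.List.pyGetD (rowD X Y delta t i) 0 0 + delta]
    = (List.range (k + 1)).map (fun j => dpD X Y delta t (i+1) j) := by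
  induction k with
  | zero =>
    rw [show ((0:Nat):Int) + 1 = 1 by norm_num, PySem.List.pyRange_one_eq_nil (le_refl 1)]
    simp only [List.foldl_nil]
    rw [PySem.List.pyGetD_zero, rowD_getD X Y delta t i 0 (by omega)]
    simp [dpD_succ_zero]
  | succ k ih =>
    have hk' : k ≤ Y.length := by omega
    rw [show ((k+1:Nat):Int) + 1 = ((k:Int) + 1) + 1 by push_cast; ring,
        PySem.List.pyRange_one_succ_right (by omega : (1:Int) ≤ (k:Int) + 1),
        List.foldl_append, ih hk']
    simp only [List.foldl_cons, List.foldl_nil]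
    rw [show (k:Int) + 1 - 1 = ((k:Nat):Int) by ring,
        show (k:Int) + 1 = ((k+1:Nat):Int) by push_cast; ring,
        PySem.List.pyGetD_natCast, PySem.List.pyGetD_natCast, PySem.List.pyGetD_natCast,
        PySem.List.pyGetD_natCast,
        PySem.List.getD_map_range _ _ _ _ (by omega : k < k + 1),
        rowD_getD X Y delta t i (k+1) (by omega), rowD_getD X Y delta t i k (by omega),
        List.range_succ (n := k + 1), List.map_append, List.map_cons, List.map_nil]
    congr 1
    rw [hx, show dpD X Y delta t (i+1) (k+1) = min (min (dpD X Y delta t (i+1) k + delta)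
          (dpD X Y delta t i (k+1) + delta))
        (dpD X Y delta t i k + alphaGet t (X.getD i "") (Y.getD k "")) from by rw [dpD]]

lemma rowA (X Y : List String) (delta : Int) (t : List (String × String × Int)) (i : Nat) (x : String)
    (hx : x = X.getD i "") :
    (PySem.List.pyRange 1 ((Y.length : Int) + 1) 1).foldl
      (fun current j => current ++ [min (min (PySem.List.pyGetD current (j - 1) 0 + delta)
              (PySem.List.pyGetD (rowD X Y delta t i) j 0 + delta))
          (PySem.List.pyGetD (rowD X Y delta t i) (j - 1) 0
            + alphaGet t x (PySem.List.pyGetD Y (j - 1) ""))])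
      [PySem.List.pyGetD (rowD X Y delta t i) 0 0 + delta]
    = rowD X Y delta t (i+1) :=
  innerA X Y delta t i x hx Y.length (le_refl _)

lemma foldA (X Y : List String) (delta : Int) (t : List (String × String × Int)) :
    ∀ (S : List String) (k : Nat), X.drop k = S → k ≤ X.length →
    S.foldl (fun prev x =>
      (PySem.List.pyRange 1 ((Y.length : Int) + 1) 1).foldl
        (fun current j => current ++ [min (min (PySem.List.pyGetD current (j - 1) 0 + delta)
                (PySem.List.pyGetD prev j 0 + delta))
            (PySem.List.pyGetD prev (j - 1) 0 + alphaGet t x (PySem.List.pyGetD Y (j - 1) ""))])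
        [PySem.List.pyGetD prev 0 0 + delta]) (rowD X Y delta t k)
    = rowD X Y delta t X.length := by
  intro S
  induction S with
  | nil =>
    intro k hdrop hk
    have : k = X.length := by
      have := List.drop_eq_nil_iff.mp hdrop; omega
    simp [this]
  | cons x S ih =>
    intro k hdrop hk
    have hklt : k < X.length := by
      by_contra h
      rw [List.drop_eq_nil_iff.mpr (by omega)] at hdrop; simp at hdrop
    have hdrop' : X.drop (k+1) = S := by
      have := List.drop_eq_getElem_cons hklt
      rw [this] at hdrop
      exact (List.cons.injEq _ _ _ _ ▸ hdrop).2
    have hx : x = X.getD k "" := by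
      have := List.drop_eq_getElem_cons hklt
      rw [this] at hdrop
      have hx1 : X[k] = x := ((List.cons.injEq _ _ _ _ ▸ hdrop).1)
      rw [← hx1, List.getD_eq_getElem _ _ hklt]
    rw [List.foldl_cons, rowA X Y delta t k x hx]
    exact ih (k+1) hdrop' (by omega)

lemma initA (Y : List String) (delta : Int) :
    (PySem.List.pyRange 0 ((Y.length : Int) + 1) 1).foldl (fun acc i => acc ++ [i * delta]) []
    = (List.range (Y.length + 1)).map (fun j : Nat => (j : Int) * delta) := by
  rw [PySem.List.foldl_append_singleton_eq_map, List.nil_append,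
      show ((Y.length : Int) + 1) = ((Y.length + 1 : Nat) : Int) by push_cast; ring_nf,
      PySem.List.pyRange_zero_natCast]
  simp

lemma helperA_eq (X Y : List String) (delta : Int) (t : List (String × String × Int)) :
    helper_div_conquer X Y delta t = rowD X Y delta t X.length := by
  unfold helper_div_conquer
  rw [initA]
  have h0 : (List.range (Y.length + 1)).map (fun j : Nat => (j : Int) * delta) = rowD X Y delta t 0 := by
    unfold rowD; apply List.map_congr_left; intro j hj; rw [dpD]
  rw [h0]
  exact foldA X Y delta t X 0 rfl (by omega)

-- B side
lemma dpD_zero_succ (X Y : List String) (delta : Int) (t : List (String × String × Int)) (j : Nat) :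
    dpD X Y delta t 0 (j+1) = dpD X Y delta t 0 j + delta := by
  rw [dpD, dpD]; push_cast; ring

lemma dpD_succ_succ' (X Y : List String) (delta : Int) (t : List (String × String × Int)) (i j : Nat) :
    dpD X Y delta t (i+1) (j+1) = min (min (dpD X Y delta t i (j+1) + delta)
        (dpD X Y delta t (i+1) j + delta))
      (dpD X Y delta t i j + alphaGet t (X.getD i "") (Y.getD j "")) := by
  rw [dpD, min_comm (dpD X Y delta t (i+1) j + delta) (dpD X Y delta t i (j+1) + delta)]

lemma innerB (X Y : List String) (delta : Int) (t : List (String × String × Int)) (j : Nat) (y : String)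
    (hy : y = Y.getD j "") (k : Nat) (hk : k ≤ X.length) :
    (PySem.List.pyRange 1 ((k : Int) + 1) 1).foldl
      (fun cur i => cur ++ [min (min (PySem.List.pyGetD cur (i - 1) 0 + delta)
              (PySem.List.pyGetD (colD X Y delta t j) i 0 + delta))
          (PySem.List.pyGetD (colD X Y delta t j) (i - 1) 0
            + alphaGet t (PySem.List.pyGetD X (i - 1) "") y)])
      [PySem.List.pyGetD (colD X Y delta t j) 0 0 + delta]
    = (List.range (k + 1)).map (fun i => dpD X Y delta t i (j+1)) := by
  induction k with
  | zero =>
    rw [show ((0:Nat):Int) + 1 = 1 by norm_num, PySem.List.pyRange_one_eq_nil (le_refl 1)]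
    simp only [List.foldl_nil]
    rw [PySem.List.pyGetD_zero, colD_getD X Y delta t j 0 (by omega)]
    simp [dpD_zero_succ]
  | succ k ih =>
    have hk' : k ≤ X.length := by omega
    rw [show ((k+1:Nat):Int) + 1 = ((k:Int) + 1) + 1 by push_cast; ring,
        PySem.List.pyRange_one_succ_right (by omega : (1:Int) ≤ (k:Int) + 1),
        List.foldl_append, ih hk']
    simp only [List.foldl_cons, List.foldl_nil]
    rw [show (k:Int) + 1 - 1 = ((k:Nat):Int) by ring,
        show (k:Int) + 1 = ((k+1:Nat):Int) by push_cast; ring,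
        PySem.List.pyGetD_natCast, PySem.List.pyGetD_natCast, PySem.List.pyGetD_natCast,
        PySem.List.pyGetD_natCast,
        PySem.List.getD_map_range _ _ _ _ (by omega : k < k + 1),
        colD_getD X Y delta t j (k+1) (by omega), colD_getD X Y delta t j k (by omega),
        List.range_succ (n := k + 1), List.map_append, List.map_cons, List.map_nil]
    congr 1
    rw [hy, dpD_succ_succ']

lemma foldB (X Y : List String) (delta : Int) (t : List (String × String × Int)) :
    ∀ (S : List String) (k : Nat), Y.drop k = S → k ≤ Y.length →
    S.foldl (fun (st : List Int × List Int) y =>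
      let cur := (PySem.List.pyRange 1 ((X.length : Int) + 1) 1).foldl
          (fun cur i => cur ++ [min (min (PySem.List.pyGetD cur (i - 1) 0 + delta)
                  (PySem.List.pyGetD st.1 i 0 + delta))
              (PySem.List.pyGetD st.1 (i - 1) 0
                + alphaGet t (PySem.List.pyGetD X (i - 1) "") y)])
        [PySem.List.pyGetD st.1 0 0 + delta]
      (cur, st.2 ++ [PySem.List.pyGetD cur (X.length : Int) 0]))
      (colD X Y delta t k, resD X Y delta t k)
    = (colD X Y delta t Y.length, resD X Y delta t Y.length) := by
  intro S
  induction S with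
  | nil =>
    intro k hdrop hk
    have : k = Y.length := by
      have := List.drop_eq_nil_iff.mp hdrop; omega
    simp [this]
  | cons y S ih =>
    intro k hdrop hk
    have hklt : k < Y.length := by
      by_contra h
      rw [List.drop_eq_nil_iff.mpr (by omega)] at hdrop; simp at hdrop
    have hdrop' : Y.drop (k+1) = S := by
      have := List.drop_eq_getElem_cons hklt
      rw [this] at hdrop
      exact (List.cons.injEq _ _ _ _ ▸ hdrop).2
    have hy : y = Y.getD k "" := by
      have := List.drop_eq_getElem_cons hklt
      rw [this] at hdrop
      have hy1 : Y[k] = y := ((List.cons.injEq _ _ _ _ ▸ hdrop).1)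
      rw [← hy1, List.getD_eq_getElem _ _ hklt]
    rw [List.foldl_cons]
    have hcur := innerB X Y delta t k y hy X.length (le_refl _)
    simp only
    rw [hcur]
    have hlast : PySem.List.pyGetD ((List.range (X.length + 1)).map
        (fun i => dpD X Y delta t i (k+1))) (X.length : Int) 0 = dpD X Y delta t X.length (k+1) := by
      rw [PySem.List.pyGetD_natCast]
      exact PySem.List.getD_map_range _ _ _ _ (by omega)
    rw [hlast]
    have hcol : (List.range (X.length + 1)).map (fun i => dpD X Y delta t i (k+1))
        = colD X Y delta t (k+1) := rfl
    have hres : resD X Y delta t k ++ [dpD X Y delta t X.length (k+1)] = resD X Y delta t (k+1) := by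
      unfold resD
      rw [List.range_succ (n := k+1), List.map_append, List.map_cons, List.map_nil]
    rw [hcol, hres]
    exact ih (k+1) hdrop' (by omega)

lemma helperB_eq (X Y : List String) (delta : Int) (t : List (String × String × Int)) :
    helper_div_conquer_alt X Y delta t = resD X Y delta t Y.length := by
  unfold helper_div_conquer_alt
  simp only
  have hinit : (PySem.List.pyRange 0 ((X.length : Int) + 1) 1).map (fun i => i * delta)
      = colD X Y delta t 0 := by
    rw [show ((X.length : Int) + 1) = ((X.length + 1 : Nat) : Int) by push_cast; ring,
        PySem.List.pyRange_zero_natCast]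
    unfold colD
    simp [dpD_zero_right]
  have hres0 : [(X.length : Int) * delta] = resD X Y delta t 0 := by
    unfold resD
    simp [dpD_zero_right]
  rw [hinit, hres0]
  exact congrArg Prod.snd (foldB X Y delta t Y 0 rfl (by omega))

-- ===== VERDICT (by name: the statement is the Claim_ definition above) =====
theorem helper_div_conquer_spec : Claim_equal_helper_div_conquer := by
  intro X Y delta t _ _
  unfold Spec_helper_div_conquer
  rw [helperA_eq, helperB_eq]
  rfl
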